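-- pv_equiv track=rewrite | github.com/ryanh6/carddatabase | webscraper.py | filterRarity
-- ===== SOURCE A (Python) =====
-- def filterRarity(array):
--     rarityString = ""
--     rarityOrder = ['C', 'R', 'RR', 'RRR']
--
--     # Find the Main Highest Rarity of the Card
--     for rare in rarityOrder:
--         for item in array:
--             if (item == rare):
--                 rarityString = item
--
--     # Find any other Rarities
--     for item in array:
--         toRemove = False
--         for rare in rarityOrder:
--             if (item == rare):
--                 toRemove = True
--
--         # If we find Special Rarity, add to List
--         if (toRemove == False):
--             if (rarityString == ""):
--                 rarityString += item
--             else: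
--                 rarityString += "+" + item
--
--     # Return our list of Rarities
--     if (rarityString == ""):
--         return "-"
--     return rarityString
-- ===== SOURCE B (Python) =====
-- def filterRarity(array):
--     order = {'C': 0, 'R': 1, 'RR': 2, 'RRR': 3}
--     names = ['C', 'R', 'RR', 'RRR']
--     best = -1
--     specials = []
--     for item in array:
--         idx = order.get(item)
--         if idx is None:
--             specials.append(item)
--         elif idx > best:
--             best = idx
--     acc = names[best] if best >= 0 else ""
--     for s in specials:
--         if acc == "":
--             acc = s
--         else:
--             acc += "+" + s
--     return "-" if acc == "" else acc
-- ===== Notes on version B (the rewrite author's own statement) =====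
-- stated objective: simpler
-- what changed: One linear scan maintaining the best standard-rarity index and a list of specials replaces A's nested rarity-order x array search loop and per-item inner membership loop; the result is then assembled from that state.
import Mathlib
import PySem

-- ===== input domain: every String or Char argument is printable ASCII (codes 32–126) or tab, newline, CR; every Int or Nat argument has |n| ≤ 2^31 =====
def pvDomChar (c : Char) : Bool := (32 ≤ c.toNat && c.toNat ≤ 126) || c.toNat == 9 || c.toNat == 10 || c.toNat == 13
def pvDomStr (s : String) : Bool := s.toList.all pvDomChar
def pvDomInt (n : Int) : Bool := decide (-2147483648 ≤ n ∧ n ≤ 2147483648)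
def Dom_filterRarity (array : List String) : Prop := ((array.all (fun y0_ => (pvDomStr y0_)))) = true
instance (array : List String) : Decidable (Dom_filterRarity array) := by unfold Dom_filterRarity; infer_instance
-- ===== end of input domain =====

-- B replaces A's nested rarity-order × array search loop and per-item membership loop with one
-- linear scan maintaining the best standard-rarity index and the list of specials (objective: simpler).

-- ===== PORT A =====
def pvRarityOrder : List String := ["C", "R", "RR", "RRR"]

def filterRarity (array : List String) : String :=
  let rs1 := pvRarityOrder.foldl (fun rs rare =>
    array.foldl (fun rs item => if item == rare then item else rs) rs) ""
  let rs2 := array.foldl (fun rs item =>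
    let toRemove := pvRarityOrder.foldl (fun t rare => if item == rare then true else t) false
    if toRemove == false then
      (if rs == "" then rs ++ item else rs ++ "+" ++ item)
    else rs) rs1
  if rs2 == "" then "-" else rs2

-- ===== PORT B =====
def pvOrderDict : PySem.Dict String Int :=
  PySem.Dict.ofList [("C", 0), ("R", 1), ("RR", 2), ("RRR", 3)]

def pvNames : List String := ["C", "R", "RR", "RRR"]

def filterRarity_alt (array : List String) : String :=
  let st := array.foldl (fun (st : Int × List String) item =>
    match PySem.Dict.get? pvOrderDict item with
    | none => (st.1, st.2 ++ [item])
    | some idx => if idx > st.1 then (idx, st.2) else st) ((-1 : Int), ([] : List String))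
  let acc0 := if st.1 ≥ 0 then PySem.List.pyGetD pvNames st.1 "" else ""
  let acc := st.2.foldl (fun acc s => if acc == "" then s else acc ++ ("+" ++ s)) acc0
  if acc == "" then "-" else acc

-- ===== PRECONDITION & SPEC =====
def Spec_filterRarity (array : List String) (out : String) : Prop := out = filterRarity_alt array
instance (array : List String) (out : String) : Decidable (Spec_filterRarity array out) := by unfold Spec_filterRarity; infer_instance

-- ===== CLAIM (what is proved, stated in full; the proofs are below) =====
def Claim_equal_filterRarity : Prop := ∀ (array : List String), Dom_filterRarity array → Spec_filterRarity array (filterRarity array)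

-- ===== LEMMAS AND PROOFS =====

/-- rank of the highest standard rarity present, -1 if none -/
def pvRank (a : List String) : Int :=
  if "RRR" ∈ a then 3 else if "RR" ∈ a then 2 else if "R" ∈ a then 1
  else if "C" ∈ a then 0 else -1

/-- the dict's index of a key, -1 for a non-key -/
def pvIdx (x : String) : Int :=
  match PySem.Dict.get? pvOrderDict x with
  | none => -1
  | some i => i

def pvName (r : Int) : String :=
  if r = 3 then "RRR" else if r = 2 then "RR" else if r = 1 then "R"
  else if r = 0 then "C" else ""

lemma pvDict_eq : pvOrderDict = PySem.Dict.mk [("C", 0), ("R", 1), ("RR", 2), ("RRR", 3)] := by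
  decide

lemma pvGet_eq (x : String) :
    PySem.Dict.get? pvOrderDict x =
      (if x = "C" then some 0 else if x = "R" then some 1 else if x = "RR" then some 2
       else if x = "RRR" then some 3 else none) := by
  by_cases h0 : x = "C"
  · subst h0; decide
  by_cases h1 : x = "R"
  · subst h1; decide
  by_cases h2 : x = "RR"
  · subst h2; decide
  by_cases h3 : x = "RRR"
  · subst h3; decide
  have c0 : ("C" == x) = false := beq_eq_false_iff_ne.mpr (fun hh => h0 hh.symm)
  have c1 : ("R" == x) = false := beq_eq_false_iff_ne.mpr (fun hh => h1 hh.symm)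
  have c2 : ("RR" == x) = false := beq_eq_false_iff_ne.mpr (fun hh => h2 hh.symm)
  have c3 : ("RRR" == x) = false := beq_eq_false_iff_ne.mpr (fun hh => h3 hh.symm)
  rw [pvDict_eq]
  simp [PySem.Dict.get?, c0, c1, c2, c3, h0, h1, h2, h3]

lemma pvL1 (r : String) (a : List String) :
    ∀ init, a.foldl (fun rs item => if item == r then item else rs) init
      = if r ∈ a then r else init := by
  induction a with
  | nil => simp
  | cons x xs ih =>
    intro init
    rw [List.foldl_cons, ih]
    by_cases h : x = r
    · simp [h]
    · have hrx : ¬ r = x := fun hh => h hh.symm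
      simp [List.mem_cons, h, hrx, beq_iff_eq]

lemma pvA_high (a : List String) :
    pvRarityOrder.foldl (fun rs rare =>
      a.foldl (fun rs item => if item == rare then item else rs) rs) ""
    = pvName (pvRank a) := by
  simp only [pvRarityOrder, List.foldl_cons, List.foldl_nil, pvL1]
  by_cases h3 : "RRR" ∈ a <;> by_cases h2 : "RR" ∈ a <;> by_cases h1 : "R" ∈ a <;>
    by_cases h0 : "C" ∈ a <;> simp [pvName, pvRank, h3, h2, h1, h0]

lemma pvRank_cons (x : String) (xs : List String) :
    pvRank (x :: xs) = max (pvIdx x) (pvRank xs) := by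
  by_cases h0 : x = "C" <;> by_cases h1 : x = "R" <;> by_cases h2 : x = "RR" <;>
    by_cases h3 : x = "RRR" <;>
    simp_all [pvRank, pvIdx, pvGet_eq, List.mem_cons] <;>
    split_ifs <;> simp_all

lemma pvRank_ge (a : List String) : -1 ≤ pvRank a := by
  unfold pvRank; split_ifs <;> omega

/-- A's membership loop computes exactly "the dict has the key". -/
lemma pvMember_eq (x : String) :
    pvRarityOrder.foldl (fun t rare => if x == rare then true else t) false
      = (PySem.Dict.get? pvOrderDict x).isSome := by
  by_cases h0 : x = "C" <;> by_cases h1 : x = "R" <;> by_cases h2 : x = "RR" <;>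
    by_cases h3 : x = "RRR" <;>
    simp_all [pvRarityOrder, pvGet_eq, beq_iff_eq]

/-- B's fold splits into an independent best-index fold and a filter. -/
lemma pvB_split (a : List String) : ∀ (b : Int) (l : List String),
    a.foldl (fun (st : Int × List String) item =>
      match PySem.Dict.get? pvOrderDict item with
      | none => (st.1, st.2 ++ [item])
      | some idx => if idx > st.1 then (idx, st.2) else st) (b, l)
    = (a.foldl (fun b item =>
        match PySem.Dict.get? pvOrderDict item with
        | none => b
        | some idx => if idx > b then idx else b) b,
       l ++ a.filter (fun item => (PySem.Dict.get? pvOrderDict item).isNone)) := by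
  induction a with
  | nil => simp
  | cons x xs ih =>
    intro b l
    cases hx : PySem.Dict.get? pvOrderDict x with
    | none => simp [List.foldl_cons, hx, ih]
    | some i =>
      by_cases hgt : i > b <;> simp [List.foldl_cons, hx, hgt, ih]

/-- the best-index fold computes the max of the initial value and the rank. -/
lemma pvB_best (a : List String) : ∀ (b : Int), -1 ≤ b →
    a.foldl (fun b item =>
      match PySem.Dict.get? pvOrderDict item with
      | none => b
      | some idx => if idx > b then idx else b) b
    = max b (pvRank a) := by
  induction a with
  | nil => intro b hb; simp [pvRank]; omega
  | cons x xs ih =>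
    intro b hb
    have hstep : (match PySem.Dict.get? pvOrderDict x with
        | none => b
        | some idx => if idx > b then idx else b) = max b (pvIdx x) := by
      unfold pvIdx
      cases hx : PySem.Dict.get? pvOrderDict x with
      | none => simp; omega
      | some i => simp; split_ifs <;> omega
    have hge : -1 ≤ max b (pvIdx x) := by omega
    rw [List.foldl_cons, hstep, ih _ hge, pvRank_cons]
    have := pvRank_ge xs
    omega

lemma pvName_eq (a : List String) :
    (if max (-1) (pvRank a) ≥ 0 then PySem.List.pyGetD pvNames (max (-1) (pvRank a)) "" else "")
      = pvName (pvRank a) := by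
  have h := pvRank_ge a
  have : max (-1) (pvRank a) = pvRank a := by omega
  rw [this]
  unfold pvRank pvName
  split_ifs <;> first
    | rfl
    | simp_all

lemma pvA_tail (a : List String) : ∀ init,
    a.foldl (fun rs item =>
      if (pvRarityOrder.foldl (fun t rare => if item == rare then true else t) false == false) = true then
        (if rs == "" then rs ++ item else rs ++ "+" ++ item) else rs) init
    = (a.filter (fun item => (PySem.Dict.get? pvOrderDict item).isNone)).foldl
        (fun acc s => if acc == "" then s else acc ++ ("+" ++ s)) init := by
  induction a with
  | nil => simp
  | cons x xs ih =>
    intro init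
    have hm := pvMember_eq x
    simp only [List.foldl_cons]
    cases hx : PySem.Dict.get? pvOrderDict x with
    | none =>
      rw [hx] at hm
      rw [hm]
      rw [if_pos (by decide)]
      have hf : (x :: xs).filter (fun item => (PySem.Dict.get? pvOrderDict item).isNone)
          = x :: xs.filter (fun item => (PySem.Dict.get? pvOrderDict item).isNone) := by
        simp [hx]
      rw [hf, List.foldl_cons, ih]
      congr 1
      by_cases hinit : init = "" <;> simp [hinit, String.append_assoc]
    | some i =>
      rw [hx] at hm
      rw [hm]
      rw [if_neg (by simp)]
      have hf : (x :: xs).filter (fun item => (PySem.Dict.get? pvOrderDict item).isNone)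
          = xs.filter (fun item => (PySem.Dict.get? pvOrderDict item).isNone) := by
        simp [hx]
      rw [hf, ih]

-- ===== VERDICT (by name: the statement is the Claim_ definition above) =====
theorem filterRarity_spec : Claim_equal_filterRarity := by
  intro array _
  unfold Spec_filterRarity filterRarity filterRarity_alt
  simp only []
  rw [pvB_split, pvB_best array (-1) (by norm_num), pvName_eq, pvA_high, List.nil_append]
  rw [pvA_tail array (pvName (pvRank array))]
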